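-- pv_equiv track=rewrite | github.com/AndreiPiterbarg/compact_sidon | tests/verify_part3.py | contributing_bins_brute
-- ===== SOURCE A (Python) =====
-- def contributing_bins_brute(d, ell, s_lo):
--     """Brute-force: which bins i contribute to window [s_lo, s_lo+ell-2]."""
--     s_hi = s_lo + ell - 2
--     result = set()
--     for i in range(d):
--         for j in range(d):
--             if s_lo <= i + j <= s_hi:
--                 result.add(i)
--                 break
--     return result
-- ===== SOURCE B (Python) =====
-- def contributing_bins_brute(d, ell, s_lo):
--     """Interval arithmetic: bin i contributes iff some j in [0,d) has s_lo <= i+j <= s_hi,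
--     i.e. iff the window is nonempty and max(0, s_lo-d+1) <= i <= min(d-1, s_hi)."""
--     s_hi = s_lo + ell - 2
--     if s_hi < s_lo:
--         return set()
--     lo = max(0, s_lo - d + 1)
--     hi = min(d - 1, s_hi)
--     return set(range(lo, hi + 1))
-- ===== Notes on version B (the rewrite author's own statement) =====
-- stated objective: faster
-- what changed: Replaces the double loop over all (i,j) pairs with a closed-form computation of the contributing interval [max(0,s_lo-d+1), min(d-1,s_hi)], emitted directly as a range.
import Mathlib
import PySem

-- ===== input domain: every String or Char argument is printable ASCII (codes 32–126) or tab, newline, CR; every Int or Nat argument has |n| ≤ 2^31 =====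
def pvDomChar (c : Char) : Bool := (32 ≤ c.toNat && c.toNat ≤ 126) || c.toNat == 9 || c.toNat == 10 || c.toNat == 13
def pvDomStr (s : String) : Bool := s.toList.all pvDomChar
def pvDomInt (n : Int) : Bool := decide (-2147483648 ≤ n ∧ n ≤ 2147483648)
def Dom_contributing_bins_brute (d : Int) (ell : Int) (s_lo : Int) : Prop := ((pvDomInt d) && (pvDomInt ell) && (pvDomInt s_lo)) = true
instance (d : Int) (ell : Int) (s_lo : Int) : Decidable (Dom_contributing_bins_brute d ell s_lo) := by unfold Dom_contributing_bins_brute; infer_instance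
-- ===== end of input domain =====

-- B replaces A's double loop over all (i, j) pairs by a closed-form interval of contributing bins (objective: faster).

-- ===== PORT A =====
-- inner 'for j in range(d): if s_lo <= i+j <= s_hi: result.add(i); break' — returns whether the break fires
def pvInnerA (s_lo : Int) (s_hi : Int) (i : Int) : List Int → Bool
  | [] => false
  | j :: rest => if s_lo ≤ i + j ∧ i + j ≤ s_hi then true else pvInnerA s_lo s_hi i rest

def contributing_bins_brute (d : Int) (ell : Int) (s_lo : Int) : List Int :=
  let s_hi := s_lo + ell - 2
  (PySem.List.pyRange 0 d 1).foldl
    (fun result i =>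
      if pvInnerA s_lo s_hi i (PySem.List.pyRange 0 d 1) then PySem.Set.add result i else result)
    PySem.Set.empty

-- ===== PORT B =====
def contributing_bins_brute_alt (d : Int) (ell : Int) (s_lo : Int) : List Int :=
  let s_hi := s_lo + ell - 2
  if s_hi < s_lo then PySem.Set.empty
  else PySem.Set.ofList (PySem.List.pyRange (max 0 (s_lo - d + 1)) (min (d - 1) s_hi + 1) 1)

-- ===== PRECONDITION & SPEC =====
def Spec_contributing_bins_brute (d : Int) (ell : Int) (s_lo : Int) (out : List Int) : Prop := out = contributing_bins_brute_alt d ell s_lo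
instance (d : Int) (ell : Int) (s_lo : Int) (out : List Int) : Decidable (Spec_contributing_bins_brute d ell s_lo out) := by unfold Spec_contributing_bins_brute; infer_instance

-- ===== CLAIM (what is proved, stated in full; the proofs are below) =====
def Claim_equal_contributing_bins_brute : Prop := ∀ (d : Int) (ell : Int) (s_lo : Int), Dom_contributing_bins_brute d ell s_lo → Spec_contributing_bins_brute d ell s_lo (contributing_bins_brute d ell s_lo)

-- ===== LEMMAS AND PROOFS =====

theorem pvInnerA_iff (s_lo s_hi i : Int) (js : List Int) :
    pvInnerA s_lo s_hi i js = true ↔ ∃ j ∈ js, s_lo ≤ i + j ∧ i + j ≤ s_hi := by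
  induction js with
  | nil => simp [pvInnerA]
  | cons j rest ih =>
    simp only [pvInnerA]
    split_ifs with h
    · constructor
      · intro _; exact ⟨j, by simp, h⟩
      · intro _; rfl
    · rw [ih]
      constructor
      · rintro ⟨x, hx, hc⟩; exact ⟨x, List.mem_cons_of_mem _ hx, hc⟩
      · rintro ⟨x, hx, hc⟩
        rcases List.mem_cons.mp hx with rfl | hx'
        · exact absurd hc h
        · exact ⟨x, hx', hc⟩

theorem set_add_not_mem {s : List Int} {x : Int} (h : x ∉ s) :
    PySem.Set.add s x = s ++ [x] := by
  simp [PySem.Set.add, PySem.Set.contains, h]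

theorem foldl_add_filter (p : Int → Bool) (xs : List Int) (s0 : List Int)
    (hnd : xs.Nodup) (hdis : ∀ x ∈ xs, x ∉ s0) :
    xs.foldl (fun s i => if p i then PySem.Set.add s i else s) s0 = s0 ++ xs.filter p := by
  induction xs generalizing s0 with
  | nil => simp
  | cons x rest ih =>
    have hx : x ∉ s0 := hdis x (by simp)
    obtain ⟨hxr, hnd'⟩ := List.nodup_cons.mp hnd
    simp only [List.foldl_cons, List.filter_cons]
    by_cases hp : p x = true
    · rw [if_pos hp, if_pos hp, set_add_not_mem hx,
        ih (s0 ++ [x]) hnd' (by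
          intro y hy hmem
          rcases List.mem_append.mp hmem with h1 | h1
          · exact hdis y (List.mem_cons_of_mem _ hy) h1
          · exact hxr ((List.mem_singleton.mp h1) ▸ hy))]
      simp
    · rw [if_neg hp, if_neg hp, ih s0 hnd' (fun y hy => hdis y (List.mem_cons_of_mem _ hy))]

theorem filter_pyRange_interval (a b lo hi : Int) :
    (PySem.List.pyRange a b 1).filter (fun i => decide (lo ≤ i ∧ i ≤ hi))
      = PySem.List.pyRange (max a lo) (min b (hi + 1)) 1 := by
  by_cases hab : b ≤ a
  · rw [PySem.List.pyRange_one_eq_nil hab,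
      PySem.List.pyRange_one_eq_nil
        (le_trans (min_le_left _ _) (le_trans hab (le_max_left _ _)))]
    rfl
  · push Not at hab
    have hm : (b - (a + 1)).toNat < (b - a).toNat := by omega
    rw [PySem.List.pyRange_one_cons hab, List.filter_cons,
        filter_pyRange_interval (a + 1) b lo hi]
    by_cases hin : lo ≤ a ∧ a ≤ hi
    · rw [if_pos (by simpa using hin), max_eq_left hin.1,
        max_eq_left (by omega : lo ≤ a + 1),
        PySem.List.pyRange_one_cons (lt_min_iff.mpr ⟨hab, by omega⟩)]
    · rw [if_neg (by simpa using hin)]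
      rcases (by omega : a < lo ∨ hi < a) with h | h
      · rw [max_eq_right (by omega : a + 1 ≤ lo), max_eq_right (le_of_lt h)]
      · rw [PySem.List.pyRange_one_eq_nil
            (le_trans (min_le_right _ _) (le_trans (by omega) (le_max_left (a + 1) lo))),
          PySem.List.pyRange_one_eq_nil
            (le_trans (min_le_right _ _) (le_trans (by omega) (le_max_left a lo)))]
  termination_by (b - a).toNat
  decreasing_by omega

theorem ofList_of_nodup (xs : List Int) (h : xs.Nodup) : PySem.Set.ofList xs = xs := by
  have gen : ∀ (ys s0 : List Int), (s0 ++ ys).Nodup → ys.foldl PySem.Set.add s0 = s0 ++ ys := by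
    intro ys
    induction ys with
    | nil => simp
    | cons y rest ih =>
      intro s0 hnd
      have hy : y ∉ s0 := fun hmem =>
        (List.disjoint_of_nodup_append hnd) hmem (by simp)
      simp only [List.foldl_cons, set_add_not_mem hy]
      rw [ih (s0 ++ [y]) (by simpa using hnd)]
      simp
  have := gen xs [] (by simpa using h)
  simpa [PySem.Set.ofList_eq_foldl] using this

theorem contributing_eq (d ell s_lo : Int) :
    contributing_bins_brute d ell s_lo = contributing_bins_brute_alt d ell s_lo := by
  unfold contributing_bins_brute contributing_bins_brute_alt
  set s_hi := s_lo + ell - 2 with hs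
  rw [foldl_add_filter (fun i => pvInnerA s_lo s_hi i (PySem.List.pyRange 0 d 1))
        (PySem.List.pyRange 0 d 1) PySem.Set.empty (PySem.List.nodup_pyRange_one 0 d)
        (by intro x _ hmem; simp [PySem.Set.empty] at hmem)]
  have hempty : (PySem.Set.empty : List Int) = [] := rfl
  rw [hempty, List.nil_append]
  by_cases hwin : s_hi < s_lo
  · rw [if_pos hwin]
    apply List.filter_eq_nil_iff.mpr
    intro i _ habs
    obtain ⟨j, _, h1, h2⟩ := (pvInnerA_iff _ _ _ _).mp (by simpa using habs)
    omega
  · rw [if_neg hwin]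
    push Not at hwin
    have hcong : (PySem.List.pyRange 0 d 1).filter
          (fun i => pvInnerA s_lo s_hi i (PySem.List.pyRange 0 d 1))
        = (PySem.List.pyRange 0 d 1).filter
          (fun i => decide (s_lo - d + 1 ≤ i ∧ i ≤ s_hi)) := by
      apply List.filter_congr
      intro i hi
      have hib : 0 ≤ i ∧ i < d := (PySem.List.mem_pyRange_one).mp hi
      show pvInnerA s_lo s_hi i (PySem.List.pyRange 0 d 1)
          = decide (s_lo - d + 1 ≤ i ∧ i ≤ s_hi)
      rcases Bool.eq_false_or_eq_true (pvInnerA s_lo s_hi i (PySem.List.pyRange 0 d 1)) with ht | hf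
      · rw [ht]
        obtain ⟨j, hj, h1, h2⟩ := (pvInnerA_iff _ _ _ _).mp ht
        rw [PySem.List.mem_pyRange_one] at hj
        symm
        rw [decide_eq_true_eq]
        omega
      · rw [hf]
        symm
        rw [decide_eq_false_iff_not]
        intro ⟨h1, h2⟩
        rw [← Bool.not_eq_true] at hf
        apply hf
        rw [pvInnerA_iff]
        refine ⟨max 0 (s_lo - i), ?_, by omega, by omega⟩
        rw [PySem.List.mem_pyRange_one]
        omega
    rw [hcong, filter_pyRange_interval,
      ofList_of_nodup _ (PySem.List.nodup_pyRange_one _ _)]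
    congr 1
    rw [← min_add_add_right]
    norm_num

-- ===== VERDICT (by name: the statement is the Claim_ definition above) =====
theorem contributing_bins_brute_spec : Claim_equal_contributing_bins_brute := by
  intro d ell s_lo _
  show contributing_bins_brute d ell s_lo = contributing_bins_brute_alt d ell s_lo
  exact contributing_eq d ell s_lo
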